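-- pv_equiv track=rewrite | github.com/kiraputri/Tubes-TBA | token.py | isKeterangan
-- ===== SOURCE A (Python) =====
-- def isKeterangan(word: str) -> bool:
--     # Ket = {'sekarang', 'pagi ini', 'di toko', 'di meja'}
--     currState = 0
--     for letter in word:
--         match currState:
--             case -1: break
--             case 0:
--                 if letter == 's': currState = 1
--                 elif letter == 'p': currState = 2
--                 elif letter == 'd': currState = 3
--                 else: currState = -1
--             case 1: currState = 4 if letter == 'e' else -1
--             case 4: currState = 5 if letter == 'k' else -1
--             case 5: currState = 6 if letter == 'a' else -1
--             case 6: currState = 7 if letter == 'r' else -1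
--             case 7: currState = 8 if letter == 'a' else -1
--             case 8: currState = 9 if letter == 'n' else -1
--             case 9: currState = 10 if letter == 'g' else -1 # final state
--             case 10: currState = 10 if letter == ' ' else -1 # final state
--             case 2: currState = 11 if letter == 'a' else -1
--             case 11: currState = 12 if letter == 'g' else -1
--             case 12: currState = 13 if letter == 'i' else -1
--             case 13: currState = 14 if letter == ' ' else -1
--             case 14: currState = 15 if letter == 'i' else -1
--             case 15: currState = 16 if letter == 'n' else -1
--             case 16: currState = 17 if letter == 'i' else -1 # final state
--             case 17: currState = 17 if letter == ' ' else -1 # final state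
--             case 3:
--                 if letter == 'i': currState = 18
--                 else: currState = -1
--             case 18:
--                 if letter == ' ': currState = 19
--                 else: currState = -1
--             case 19:
--                 if letter == 't': currState = 20
--                 elif letter == 'm': currState = 21
--                 else: currState = -1
--             case 20: currState = 22 if letter == 'o' else -1
--             case 22: currState = 23 if letter == 'k' else -1
--             case 23: currState = 24 if letter == 'o' else -1 # final state
--             case 24: currState = 24 if letter == ' ' else -1 # final state
--             case 21: currState = 25 if letter == 'e' else -1
--             case 25: currState = 26 if letter == 'j' else -1
--             case 26: currState = 27 if letter == 'a' else -1 # final state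
--             case 27: currState = 27 if letter == ' ' else -1 # final state
--     return currState == 10 or currState == 17 or currState == 24 or currState == 27
-- ===== SOURCE B (Python) =====
-- def isKeterangan(word: str) -> bool:
--     return word.rstrip(' ') in {'sekarang', 'pagi ini', 'di toko', 'di meja'}
-- ===== Notes on version B (the rewrite author's own statement) =====
-- stated objective: simpler
-- what changed: Replaces the 29-state hand-written DFA loop with stripping trailing space characters via str.rstrip followed by a set-membership test against the four keywords.
import Mathlib
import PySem

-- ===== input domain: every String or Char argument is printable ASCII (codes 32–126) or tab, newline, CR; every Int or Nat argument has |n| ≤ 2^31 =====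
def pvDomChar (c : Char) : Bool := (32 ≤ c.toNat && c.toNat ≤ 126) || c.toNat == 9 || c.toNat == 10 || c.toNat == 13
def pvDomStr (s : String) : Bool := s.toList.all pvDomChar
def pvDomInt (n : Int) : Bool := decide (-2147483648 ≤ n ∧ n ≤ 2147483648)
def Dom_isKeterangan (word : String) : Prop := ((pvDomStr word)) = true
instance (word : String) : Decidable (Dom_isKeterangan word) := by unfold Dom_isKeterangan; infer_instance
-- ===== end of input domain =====

-- B replaces A's hand-written 29-state DFA loop with stripping trailing space characters (str.rstrip) followed by membership in the four keywords (simpler).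


-- ===== PORT A =====
-- one iteration of the match statement (Python's match here is an if-chain on the
-- state; a state not listed would fall through leaving the state unchanged)
def stepA (s : Int) (c : Char) : Int :=
  if s = 0 then (if c = 's' then 1 else if c = 'p' then 2 else if c = 'd' then 3 else -1)
    else if s = 1 then (if c = 'e' then 4 else -1)
    else if s = 4 then (if c = 'k' then 5 else -1)
    else if s = 5 then (if c = 'a' then 6 else -1)
    else if s = 6 then (if c = 'r' then 7 else -1)
    else if s = 7 then (if c = 'a' then 8 else -1)
    else if s = 8 then (if c = 'n' then 9 else -1)
    else if s = 9 then (if c = 'g' then 10 else -1)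
    else if s = 10 then (if c = ' ' then 10 else -1)
    else if s = 2 then (if c = 'a' then 11 else -1)
    else if s = 11 then (if c = 'g' then 12 else -1)
    else if s = 12 then (if c = 'i' then 13 else -1)
    else if s = 13 then (if c = ' ' then 14 else -1)
    else if s = 14 then (if c = 'i' then 15 else -1)
    else if s = 15 then (if c = 'n' then 16 else -1)
    else if s = 16 then (if c = 'i' then 17 else -1)
    else if s = 17 then (if c = ' ' then 17 else -1)
    else if s = 3 then (if c = 'i' then 18 else -1)
    else if s = 18 then (if c = ' ' then 19 else -1)
    else if s = 19 then (if c = 't' then 20 else if c = 'm' then 21 else -1)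
    else if s = 20 then (if c = 'o' then 22 else -1)
    else if s = 22 then (if c = 'k' then 23 else -1)
    else if s = 23 then (if c = 'o' then 24 else -1)
    else if s = 24 then (if c = ' ' then 24 else -1)
    else if s = 21 then (if c = 'e' then 25 else -1)
    else if s = 25 then (if c = 'j' then 26 else -1)
    else if s = 26 then (if c = 'a' then 27 else -1)
    else if s = 27 then (if c = ' ' then 27 else -1)
  else s

-- the for-loop over the word; 'case -1: break' leaves the loop with the state -1
def loopA (s : Int) (cs : List Char) : Int :=
  match cs with
  | [] => s
  | c :: rest => if s = -1 then s else loopA (stepA s c) rest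

def isKeterangan (word : String) : Bool :=
  let f := loopA 0 word.toList
  f == 10 || f == 17 || f == 24 || f == 27

-- ===== PORT B =====
-- word.rstrip of the space character, ported by hand: drop exactly the trailing spaces (exact)
def rstripSp (cs : List Char) : List Char := (cs.reverse.dropWhile (· == ' ')).reverse

def isKeterangan_alt (word : String) : Bool :=
  let key := rstripSp word.toList
  [String.toList "sekarang", String.toList "pagi ini",
   String.toList "di toko", String.toList "di meja"].contains key

-- ===== PRECONDITION & SPEC =====
def Spec_isKeterangan (word : String) (out : Bool) : Prop := out = isKeterangan_alt word
instance (word : String) (out : Bool) : Decidable (Spec_isKeterangan word out) := by unfold Spec_isKeterangan; infer_instance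

-- ===== CLAIM (what is proved, stated in full; the proofs are below) =====
def Claim_equal_isKeterangan : Prop := ∀ (word : String), Dom_isKeterangan word → Spec_isKeterangan word (isKeterangan word)

-- ===== LEMMAS AND PROOFS =====

-- front-recursive equivalent of rstripSp, convenient for induction
def R : List Char → List Char
  | [] => []
  | c :: t => if R t = [] then (if c = ' ' then [] else [c]) else c :: R t

theorem R_eq_rstripSp : ∀ cs : List Char, R cs = rstripSp cs := by
  intro cs
  induction cs with
  | nil => rfl
  | cons c t ih =>
    by_cases hd : t.reverse.dropWhile (· == ' ') = []
    · have hRt : R t = [] := by simp [ih, rstripSp, hd]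
      by_cases hc : c = ' ' <;>
        simp [R, hRt, rstripSp, List.dropWhile_append, hd, hc, beq_iff_eq]
    · have hRt : R t ≠ [] := by simp [ih, rstripSp, hd]
      simp [R, rstripSp, List.dropWhile_append, List.isEmpty_iff, hd, ih]

-- residual language of each DFA state: the cores u (trailing spaces already
-- removed) such that from this state the input u ++ spaces is accepted
def need (s : Int) : List (List Char) :=
  if s = 0 then [['s','e','k','a','r','a','n','g'],['p','a','g','i',' ','i','n','i'],['d','i',' ','t','o','k','o'],['d','i',' ','m','e','j','a']]
    else if s = 1 then [['e','k','a','r','a','n','g']]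
    else if s = 4 then [['k','a','r','a','n','g']]
    else if s = 5 then [['a','r','a','n','g']]
    else if s = 6 then [['r','a','n','g']]
    else if s = 7 then [['a','n','g']]
    else if s = 8 then [['n','g']]
    else if s = 9 then [['g']]
    else if s = 10 then [[]]
    else if s = 2 then [['a','g','i',' ','i','n','i']]
    else if s = 11 then [['g','i',' ','i','n','i']]
    else if s = 12 then [['i',' ','i','n','i']]
    else if s = 13 then [[' ','i','n','i']]
    else if s = 14 then [['i','n','i']]
    else if s = 15 then [['n','i']]
    else if s = 16 then [['i']]
    else if s = 17 then [[]]
    else if s = 3 then [['i',' ','t','o','k','o'],['i',' ','m','e','j','a']]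
    else if s = 18 then [[' ','t','o','k','o'],[' ','m','e','j','a']]
    else if s = 19 then [['t','o','k','o'],['m','e','j','a']]
    else if s = 20 then [['o','k','o']]
    else if s = 22 then [['k','o']]
    else if s = 23 then [['o']]
    else if s = 24 then [[]]
    else if s = 21 then [['e','j','a']]
    else if s = 25 then [['j','a']]
    else if s = 26 then [['a']]
    else if s = 27 then [[]]
  else []

theorem needv0 : need (0 : Int) = [['s','e','k','a','r','a','n','g'],['p','a','g','i',' ','i','n','i'],['d','i',' ','t','o','k','o'],['d','i',' ','m','e','j','a']] := by decide
theorem needv1 : need (1 : Int) = [['e','k','a','r','a','n','g']] := by decide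
theorem needv4 : need (4 : Int) = [['k','a','r','a','n','g']] := by decide
theorem needv5 : need (5 : Int) = [['a','r','a','n','g']] := by decide
theorem needv6 : need (6 : Int) = [['r','a','n','g']] := by decide
theorem needv7 : need (7 : Int) = [['a','n','g']] := by decide
theorem needv8 : need (8 : Int) = [['n','g']] := by decide
theorem needv9 : need (9 : Int) = [['g']] := by decide
theorem needv10 : need (10 : Int) = [[]] := by decide
theorem needv2 : need (2 : Int) = [['a','g','i',' ','i','n','i']] := by decide
theorem needv11 : need (11 : Int) = [['g','i',' ','i','n','i']] := by decide
theorem needv12 : need (12 : Int) = [['i',' ','i','n','i']] := by decide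
theorem needv13 : need (13 : Int) = [[' ','i','n','i']] := by decide
theorem needv14 : need (14 : Int) = [['i','n','i']] := by decide
theorem needv15 : need (15 : Int) = [['n','i']] := by decide
theorem needv16 : need (16 : Int) = [['i']] := by decide
theorem needv17 : need (17 : Int) = [[]] := by decide
theorem needv3 : need (3 : Int) = [['i',' ','t','o','k','o'],['i',' ','m','e','j','a']] := by decide
theorem needv18 : need (18 : Int) = [[' ','t','o','k','o'],[' ','m','e','j','a']] := by decide
theorem needv19 : need (19 : Int) = [['t','o','k','o'],['m','e','j','a']] := by decide
theorem needv20 : need (20 : Int) = [['o','k','o']] := by decide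
theorem needv22 : need (22 : Int) = [['k','o']] := by decide
theorem needv23 : need (23 : Int) = [['o']] := by decide
theorem needv24 : need (24 : Int) = [[]] := by decide
theorem needv21 : need (21 : Int) = [['e','j','a']] := by decide
theorem needv25 : need (25 : Int) = [['j','a']] := by decide
theorem needv26 : need (26 : Int) = [['a']] := by decide
theorem needv27 : need (27 : Int) = [[]] := by decide
theorem needvm1 : need (-1 : Int) = [] := by decide

def fin (s : Int) : Bool := s == 10 || s == 17 || s == 24 || s == 27

theorem key0 (c : Char) (rest : List Char) :
    (need (stepA (0 : Int) c)).contains (R rest) = (need (0 : Int)).contains (R (c :: rest)) := by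
  by_cases h0 : c = 's'
  · subst h0
    rw [show stepA (0 : Int) 's' = 1 from by decide, needv1, needv0]
    by_cases hR : R rest = [] <;> simp [R, hR]
  by_cases h1 : c = 'p'
  · subst h1
    rw [show stepA (0 : Int) 'p' = 2 from by decide, needv2, needv0]
    by_cases hR : R rest = [] <;> simp [R, hR]
  by_cases h2 : c = 'd'
  · subst h2
    rw [show stepA (0 : Int) 'd' = 3 from by decide, needv3, needv0]
    by_cases hR : R rest = [] <;> simp [R, hR]
  rw [show stepA (0 : Int) c = -1 from by simp [stepA, h0, h1, h2], needvm1, needv0]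
  by_cases hR : R rest = [] <;> by_cases hsp : c = ' ' <;> simp [R, hR, hsp, h0, h1, h2]

theorem key1 (c : Char) (rest : List Char) :
    (need (stepA (1 : Int) c)).contains (R rest) = (need (1 : Int)).contains (R (c :: rest)) := by
  by_cases h0 : c = 'e'
  · subst h0
    rw [show stepA (1 : Int) 'e' = 4 from by decide, needv4, needv1]
    by_cases hR : R rest = [] <;> simp [R, hR]
  rw [show stepA (1 : Int) c = -1 from by simp [stepA, h0], needvm1, needv1]
  by_cases hR : R rest = [] <;> by_cases hsp : c = ' ' <;> simp [R, hR, hsp, h0]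

theorem key4 (c : Char) (rest : List Char) :
    (need (stepA (4 : Int) c)).contains (R rest) = (need (4 : Int)).contains (R (c :: rest)) := by
  by_cases h0 : c = 'k'
  · subst h0
    rw [show stepA (4 : Int) 'k' = 5 from by decide, needv5, needv4]
    by_cases hR : R rest = [] <;> simp [R, hR]
  rw [show stepA (4 : Int) c = -1 from by simp [stepA, h0], needvm1, needv4]
  by_cases hR : R rest = [] <;> by_cases hsp : c = ' ' <;> simp [R, hR, hsp, h0]

theorem key5 (c : Char) (rest : List Char) :
    (need (stepA (5 : Int) c)).contains (R rest) = (need (5 : Int)).contains (R (c :: rest)) := by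
  by_cases h0 : c = 'a'
  · subst h0
    rw [show stepA (5 : Int) 'a' = 6 from by decide, needv6, needv5]
    by_cases hR : R rest = [] <;> simp [R, hR]
  rw [show stepA (5 : Int) c = -1 from by simp [stepA, h0], needvm1, needv5]
  by_cases hR : R rest = [] <;> by_cases hsp : c = ' ' <;> simp [R, hR, hsp, h0]

theorem key6 (c : Char) (rest : List Char) :
    (need (stepA (6 : Int) c)).contains (R rest) = (need (6 : Int)).contains (R (c :: rest)) := by
  by_cases h0 : c = 'r'
  · subst h0
    rw [show stepA (6 : Int) 'r' = 7 from by decide, needv7, needv6]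
    by_cases hR : R rest = [] <;> simp [R, hR]
  rw [show stepA (6 : Int) c = -1 from by simp [stepA, h0], needvm1, needv6]
  by_cases hR : R rest = [] <;> by_cases hsp : c = ' ' <;> simp [R, hR, hsp, h0]

theorem key7 (c : Char) (rest : List Char) :
    (need (stepA (7 : Int) c)).contains (R rest) = (need (7 : Int)).contains (R (c :: rest)) := by
  by_cases h0 : c = 'a'
  · subst h0
    rw [show stepA (7 : Int) 'a' = 8 from by decide, needv8, needv7]
    by_cases hR : R rest = [] <;> simp [R, hR]
  rw [show stepA (7 : Int) c = -1 from by simp [stepA, h0], needvm1, needv7]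
  by_cases hR : R rest = [] <;> by_cases hsp : c = ' ' <;> simp [R, hR, hsp, h0]

theorem key8 (c : Char) (rest : List Char) :
    (need (stepA (8 : Int) c)).contains (R rest) = (need (8 : Int)).contains (R (c :: rest)) := by
  by_cases h0 : c = 'n'
  · subst h0
    rw [show stepA (8 : Int) 'n' = 9 from by decide, needv9, needv8]
    by_cases hR : R rest = [] <;> simp [R, hR]
  rw [show stepA (8 : Int) c = -1 from by simp [stepA, h0], needvm1, needv8]
  by_cases hR : R rest = [] <;> by_cases hsp : c = ' ' <;> simp [R, hR, hsp, h0]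

theorem key9 (c : Char) (rest : List Char) :
    (need (stepA (9 : Int) c)).contains (R rest) = (need (9 : Int)).contains (R (c :: rest)) := by
  by_cases h0 : c = 'g'
  · subst h0
    rw [show stepA (9 : Int) 'g' = 10 from by decide, needv10, needv9]
    by_cases hR : R rest = [] <;> simp [R, hR]
  rw [show stepA (9 : Int) c = -1 from by simp [stepA, h0], needvm1, needv9]
  by_cases hR : R rest = [] <;> by_cases hsp : c = ' ' <;> simp [R, hR, hsp, h0]

theorem key10 (c : Char) (rest : List Char) :
    (need (stepA (10 : Int) c)).contains (R rest) = (need (10 : Int)).contains (R (c :: rest)) := by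
  by_cases h0 : c = ' '
  · subst h0
    rw [show stepA (10 : Int) ' ' = 10 from by decide, needv10]
    by_cases hR : R rest = [] <;> simp [R, hR]
  rw [show stepA (10 : Int) c = -1 from by simp [stepA, h0], needvm1, needv10]
  by_cases hR : R rest = [] <;> simp [R, hR, h0]

theorem key2 (c : Char) (rest : List Char) :
    (need (stepA (2 : Int) c)).contains (R rest) = (need (2 : Int)).contains (R (c :: rest)) := by
  by_cases h0 : c = 'a'
  · subst h0
    rw [show stepA (2 : Int) 'a' = 11 from by decide, needv11, needv2]
    by_cases hR : R rest = [] <;> simp [R, hR]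
  rw [show stepA (2 : Int) c = -1 from by simp [stepA, h0], needvm1, needv2]
  by_cases hR : R rest = [] <;> by_cases hsp : c = ' ' <;> simp [R, hR, hsp, h0]

theorem key11 (c : Char) (rest : List Char) :
    (need (stepA (11 : Int) c)).contains (R rest) = (need (11 : Int)).contains (R (c :: rest)) := by
  by_cases h0 : c = 'g'
  · subst h0
    rw [show stepA (11 : Int) 'g' = 12 from by decide, needv12, needv11]
    by_cases hR : R rest = [] <;> simp [R, hR]
  rw [show stepA (11 : Int) c = -1 from by simp [stepA, h0], needvm1, needv11]
  by_cases hR : R rest = [] <;> by_cases hsp : c = ' ' <;> simp [R, hR, hsp, h0]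

theorem key12 (c : Char) (rest : List Char) :
    (need (stepA (12 : Int) c)).contains (R rest) = (need (12 : Int)).contains (R (c :: rest)) := by
  by_cases h0 : c = 'i'
  · subst h0
    rw [show stepA (12 : Int) 'i' = 13 from by decide, needv13, needv12]
    by_cases hR : R rest = [] <;> simp [R, hR]
  rw [show stepA (12 : Int) c = -1 from by simp [stepA, h0], needvm1, needv12]
  by_cases hR : R rest = [] <;> by_cases hsp : c = ' ' <;> simp [R, hR, hsp, h0]

theorem key13 (c : Char) (rest : List Char) :
    (need (stepA (13 : Int) c)).contains (R rest) = (need (13 : Int)).contains (R (c :: rest)) := by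
  by_cases h0 : c = ' '
  · subst h0
    rw [show stepA (13 : Int) ' ' = 14 from by decide, needv14, needv13]
    by_cases hR : R rest = [] <;> simp [R, hR]
  rw [show stepA (13 : Int) c = -1 from by simp [stepA, h0], needvm1, needv13]
  by_cases hR : R rest = [] <;> simp [R, hR, h0]

theorem key14 (c : Char) (rest : List Char) :
    (need (stepA (14 : Int) c)).contains (R rest) = (need (14 : Int)).contains (R (c :: rest)) := by
  by_cases h0 : c = 'i'
  · subst h0
    rw [show stepA (14 : Int) 'i' = 15 from by decide, needv15, needv14]
    by_cases hR : R rest = [] <;> simp [R, hR]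
  rw [show stepA (14 : Int) c = -1 from by simp [stepA, h0], needvm1, needv14]
  by_cases hR : R rest = [] <;> by_cases hsp : c = ' ' <;> simp [R, hR, hsp, h0]

theorem key15 (c : Char) (rest : List Char) :
    (need (stepA (15 : Int) c)).contains (R rest) = (need (15 : Int)).contains (R (c :: rest)) := by
  by_cases h0 : c = 'n'
  · subst h0
    rw [show stepA (15 : Int) 'n' = 16 from by decide, needv16, needv15]
    by_cases hR : R rest = [] <;> simp [R, hR]
  rw [show stepA (15 : Int) c = -1 from by simp [stepA, h0], needvm1, needv15]
  by_cases hR : R rest = [] <;> by_cases hsp : c = ' ' <;> simp [R, hR, hsp, h0]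

theorem key16 (c : Char) (rest : List Char) :
    (need (stepA (16 : Int) c)).contains (R rest) = (need (16 : Int)).contains (R (c :: rest)) := by
  by_cases h0 : c = 'i'
  · subst h0
    rw [show stepA (16 : Int) 'i' = 17 from by decide, needv17, needv16]
    by_cases hR : R rest = [] <;> simp [R, hR]
  rw [show stepA (16 : Int) c = -1 from by simp [stepA, h0], needvm1, needv16]
  by_cases hR : R rest = [] <;> by_cases hsp : c = ' ' <;> simp [R, hR, hsp, h0]

theorem key17 (c : Char) (rest : List Char) :
    (need (stepA (17 : Int) c)).contains (R rest) = (need (17 : Int)).contains (R (c :: rest)) := by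
  by_cases h0 : c = ' '
  · subst h0
    rw [show stepA (17 : Int) ' ' = 17 from by decide, needv17]
    by_cases hR : R rest = [] <;> simp [R, hR]
  rw [show stepA (17 : Int) c = -1 from by simp [stepA, h0], needvm1, needv17]
  by_cases hR : R rest = [] <;> simp [R, hR, h0]

theorem key3 (c : Char) (rest : List Char) :
    (need (stepA (3 : Int) c)).contains (R rest) = (need (3 : Int)).contains (R (c :: rest)) := by
  by_cases h0 : c = 'i'
  · subst h0
    rw [show stepA (3 : Int) 'i' = 18 from by decide, needv18, needv3]
    by_cases hR : R rest = [] <;> simp [R, hR]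
  rw [show stepA (3 : Int) c = -1 from by simp [stepA, h0], needvm1, needv3]
  by_cases hR : R rest = [] <;> by_cases hsp : c = ' ' <;> simp [R, hR, hsp, h0]

theorem key18 (c : Char) (rest : List Char) :
    (need (stepA (18 : Int) c)).contains (R rest) = (need (18 : Int)).contains (R (c :: rest)) := by
  by_cases h0 : c = ' '
  · subst h0
    rw [show stepA (18 : Int) ' ' = 19 from by decide, needv19, needv18]
    by_cases hR : R rest = [] <;> simp [R, hR]
  rw [show stepA (18 : Int) c = -1 from by simp [stepA, h0], needvm1, needv18]
  by_cases hR : R rest = [] <;> simp [R, hR, h0]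

theorem key19 (c : Char) (rest : List Char) :
    (need (stepA (19 : Int) c)).contains (R rest) = (need (19 : Int)).contains (R (c :: rest)) := by
  by_cases h0 : c = 't'
  · subst h0
    rw [show stepA (19 : Int) 't' = 20 from by decide, needv20, needv19]
    by_cases hR : R rest = [] <;> simp [R, hR]
  by_cases h1 : c = 'm'
  · subst h1
    rw [show stepA (19 : Int) 'm' = 21 from by decide, needv21, needv19]
    by_cases hR : R rest = [] <;> simp [R, hR]
  rw [show stepA (19 : Int) c = -1 from by simp [stepA, h0, h1], needvm1, needv19]
  by_cases hR : R rest = [] <;> by_cases hsp : c = ' ' <;> simp [R, hR, hsp, h0, h1]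

theorem key20 (c : Char) (rest : List Char) :
    (need (stepA (20 : Int) c)).contains (R rest) = (need (20 : Int)).contains (R (c :: rest)) := by
  by_cases h0 : c = 'o'
  · subst h0
    rw [show stepA (20 : Int) 'o' = 22 from by decide, needv22, needv20]
    by_cases hR : R rest = [] <;> simp [R, hR]
  rw [show stepA (20 : Int) c = -1 from by simp [stepA, h0], needvm1, needv20]
  by_cases hR : R rest = [] <;> by_cases hsp : c = ' ' <;> simp [R, hR, hsp, h0]

theorem key22 (c : Char) (rest : List Char) :
    (need (stepA (22 : Int) c)).contains (R rest) = (need (22 : Int)).contains (R (c :: rest)) := by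
  by_cases h0 : c = 'k'
  · subst h0
    rw [show stepA (22 : Int) 'k' = 23 from by decide, needv23, needv22]
    by_cases hR : R rest = [] <;> simp [R, hR]
  rw [show stepA (22 : Int) c = -1 from by simp [stepA, h0], needvm1, needv22]
  by_cases hR : R rest = [] <;> by_cases hsp : c = ' ' <;> simp [R, hR, hsp, h0]

theorem key23 (c : Char) (rest : List Char) :
    (need (stepA (23 : Int) c)).contains (R rest) = (need (23 : Int)).contains (R (c :: rest)) := by
  by_cases h0 : c = 'o'
  · subst h0
    rw [show stepA (23 : Int) 'o' = 24 from by decide, needv24, needv23]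
    by_cases hR : R rest = [] <;> simp [R, hR]
  rw [show stepA (23 : Int) c = -1 from by simp [stepA, h0], needvm1, needv23]
  by_cases hR : R rest = [] <;> by_cases hsp : c = ' ' <;> simp [R, hR, hsp, h0]

theorem key24 (c : Char) (rest : List Char) :
    (need (stepA (24 : Int) c)).contains (R rest) = (need (24 : Int)).contains (R (c :: rest)) := by
  by_cases h0 : c = ' '
  · subst h0
    rw [show stepA (24 : Int) ' ' = 24 from by decide, needv24]
    by_cases hR : R rest = [] <;> simp [R, hR]
  rw [show stepA (24 : Int) c = -1 from by simp [stepA, h0], needvm1, needv24]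
  by_cases hR : R rest = [] <;> simp [R, hR, h0]

theorem key21 (c : Char) (rest : List Char) :
    (need (stepA (21 : Int) c)).contains (R rest) = (need (21 : Int)).contains (R (c :: rest)) := by
  by_cases h0 : c = 'e'
  · subst h0
    rw [show stepA (21 : Int) 'e' = 25 from by decide, needv25, needv21]
    by_cases hR : R rest = [] <;> simp [R, hR]
  rw [show stepA (21 : Int) c = -1 from by simp [stepA, h0], needvm1, needv21]
  by_cases hR : R rest = [] <;> by_cases hsp : c = ' ' <;> simp [R, hR, hsp, h0]

theorem key25 (c : Char) (rest : List Char) :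
    (need (stepA (25 : Int) c)).contains (R rest) = (need (25 : Int)).contains (R (c :: rest)) := by
  by_cases h0 : c = 'j'
  · subst h0
    rw [show stepA (25 : Int) 'j' = 26 from by decide, needv26, needv25]
    by_cases hR : R rest = [] <;> simp [R, hR]
  rw [show stepA (25 : Int) c = -1 from by simp [stepA, h0], needvm1, needv25]
  by_cases hR : R rest = [] <;> by_cases hsp : c = ' ' <;> simp [R, hR, hsp, h0]

theorem key26 (c : Char) (rest : List Char) :
    (need (stepA (26 : Int) c)).contains (R rest) = (need (26 : Int)).contains (R (c :: rest)) := by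
  by_cases h0 : c = 'a'
  · subst h0
    rw [show stepA (26 : Int) 'a' = 27 from by decide, needv27, needv26]
    by_cases hR : R rest = [] <;> simp [R, hR]
  rw [show stepA (26 : Int) c = -1 from by simp [stepA, h0], needvm1, needv26]
  by_cases hR : R rest = [] <;> by_cases hsp : c = ' ' <;> simp [R, hR, hsp, h0]

theorem key27 (c : Char) (rest : List Char) :
    (need (stepA (27 : Int) c)).contains (R rest) = (need (27 : Int)).contains (R (c :: rest)) := by
  by_cases h0 : c = ' '
  · subst h0
    rw [show stepA (27 : Int) ' ' = 27 from by decide, needv27]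
    by_cases hR : R rest = [] <;> simp [R, hR]
  rw [show stepA (27 : Int) c = -1 from by simp [stepA, h0], needvm1, needv27]
  by_cases hR : R rest = [] <;> simp [R, hR, h0]

theorem key_step (s : Int) (c : Char) (rest : List Char) (hs : s ≠ -1) :
    (need (stepA s c)).contains (R rest) = (need s).contains (R (c :: rest)) := by
  by_cases e0 : s = 0
  · subst e0; exact key0 c rest
  by_cases e1 : s = 1
  · subst e1; exact key1 c rest
  by_cases e4 : s = 4
  · subst e4; exact key4 c rest
  by_cases e5 : s = 5
  · subst e5; exact key5 c rest
  by_cases e6 : s = 6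
  · subst e6; exact key6 c rest
  by_cases e7 : s = 7
  · subst e7; exact key7 c rest
  by_cases e8 : s = 8
  · subst e8; exact key8 c rest
  by_cases e9 : s = 9
  · subst e9; exact key9 c rest
  by_cases e10 : s = 10
  · subst e10; exact key10 c rest
  by_cases e2 : s = 2
  · subst e2; exact key2 c rest
  by_cases e11 : s = 11
  · subst e11; exact key11 c rest
  by_cases e12 : s = 12
  · subst e12; exact key12 c rest
  by_cases e13 : s = 13
  · subst e13; exact key13 c rest
  by_cases e14 : s = 14
  · subst e14; exact key14 c rest
  by_cases e15 : s = 15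
  · subst e15; exact key15 c rest
  by_cases e16 : s = 16
  · subst e16; exact key16 c rest
  by_cases e17 : s = 17
  · subst e17; exact key17 c rest
  by_cases e3 : s = 3
  · subst e3; exact key3 c rest
  by_cases e18 : s = 18
  · subst e18; exact key18 c rest
  by_cases e19 : s = 19
  · subst e19; exact key19 c rest
  by_cases e20 : s = 20
  · subst e20; exact key20 c rest
  by_cases e22 : s = 22
  · subst e22; exact key22 c rest
  by_cases e23 : s = 23
  · subst e23; exact key23 c rest
  by_cases e24 : s = 24
  · subst e24; exact key24 c rest
  by_cases e21 : s = 21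
  · subst e21; exact key21 c rest
  by_cases e25 : s = 25
  · subst e25; exact key25 c rest
  by_cases e26 : s = 26
  · subst e26; exact key26 c rest
  by_cases e27 : s = 27
  · subst e27; exact key27 c rest
  rw [show stepA s c = s from by simp [stepA, e0, e1, e4, e5, e6, e7, e8, e9, e10, e2, e11, e12, e13, e14, e15, e16, e17, e3, e18, e19, e20, e22, e23, e24, e21, e25, e26, e27], show need s = [] from by simp [need, e0, e1, e4, e5, e6, e7, e8, e9, e10, e2, e11, e12, e13, e14, e15, e16, e17, e3, e18, e19, e20, e22, e23, e24, e21, e25, e26, e27]]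
  rfl

theorem main_lemma (cs : List Char) : ∀ s : Int, fin (loopA s cs) = (need s).contains (R cs) := by
  induction cs with
  | nil =>
    intro s
    show fin s = (need s).contains []
    by_cases e0 : s = 0
    · subst e0; decide
    by_cases e1 : s = 1
    · subst e1; decide
    by_cases e4 : s = 4
    · subst e4; decide
    by_cases e5 : s = 5
    · subst e5; decide
    by_cases e6 : s = 6
    · subst e6; decide
    by_cases e7 : s = 7
    · subst e7; decide
    by_cases e8 : s = 8
    · subst e8; decide
    by_cases e9 : s = 9
    · subst e9; decide
    by_cases e10 : s = 10
    · subst e10; decide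
    by_cases e2 : s = 2
    · subst e2; decide
    by_cases e11 : s = 11
    · subst e11; decide
    by_cases e12 : s = 12
    · subst e12; decide
    by_cases e13 : s = 13
    · subst e13; decide
    by_cases e14 : s = 14
    · subst e14; decide
    by_cases e15 : s = 15
    · subst e15; decide
    by_cases e16 : s = 16
    · subst e16; decide
    by_cases e17 : s = 17
    · subst e17; decide
    by_cases e3 : s = 3
    · subst e3; decide
    by_cases e18 : s = 18
    · subst e18; decide
    by_cases e19 : s = 19
    · subst e19; decide
    by_cases e20 : s = 20
    · subst e20; decide
    by_cases e22 : s = 22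
    · subst e22; decide
    by_cases e23 : s = 23
    · subst e23; decide
    by_cases e24 : s = 24
    · subst e24; decide
    by_cases e21 : s = 21
    · subst e21; decide
    by_cases e25 : s = 25
    · subst e25; decide
    by_cases e26 : s = 26
    · subst e26; decide
    by_cases e27 : s = 27
    · subst e27; decide
    simp [fin, need, e0, e1, e4, e5, e6, e7, e8, e9, e10, e2, e11, e12, e13, e14, e15, e16, e17, e3, e18, e19, e20, e22, e23, e24, e21, e25, e26, e27]
  | cons c rest ih =>
    intro s
    show fin (if s = -1 then s else loopA (stepA s c) rest) = (need s).contains (R (c :: rest))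
    by_cases hs : s = -1
    · subst hs; rw [if_pos rfl, needvm1]; simp [fin]
    · rw [if_neg hs, ih (stepA s c), key_step s c rest hs]

-- ===== VERDICT (by name: the statement is the Claim_ definition above) =====
theorem isKeterangan_spec : Claim_equal_isKeterangan := by
  intro word _
  show isKeterangan word = isKeterangan_alt word
  unfold isKeterangan isKeterangan_alt
  rw [← R_eq_rstripSp]
  have h4 : [String.toList "sekarang", String.toList "pagi ini",
             String.toList "di toko", String.toList "di meja"] = need 0 := by decide
  rw [h4]
  exact main_lemma word.toList 0
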